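-- pv_equiv track=rewrite | github.com/Hanzhanghub/yuangcode | lintcode/class7/two_sum_larger_than_or_equal_to_target.py | two_sum_follow_up
-- ===== SOURCE A (Python) =====
-- def two_sum_follow_up(nums, target):
--     # special condition
--     if not nums:
--         return 0
--
--     # sort nums
--     nums.sort()
--
--     # variabel defination
--     count = 0
--     left = 0
--     right = len(nums) - 1
--
--     while left < right:
--         if nums[left] + nums[right] <= target:
--             left += 1
--         else:
--             count += right - left
--             right -= 1
--
--     return count
-- ===== SOURCE B (Python) =====
-- def two_sum_follow_up(nums, target):
--     # sort kept so B performs A's in-place mutation of nums as well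
--     nums.sort()
--     count = 0
--     rest = nums
--     while rest:
--         x, rest = rest[0], rest[1:]
--         count += sum(1 for y in rest if x + y > target)
--     return count
-- ===== Notes on version B (the rewrite author's own statement) =====
-- stated objective: simpler
-- what changed: Replaces the sorted two-pointer converging sweep with a plain head-vs-rest pair count (for each element, count later elements whose sum with it exceeds target); the sort is kept only to preserve A's in-place mutation of nums.
import Mathlib
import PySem

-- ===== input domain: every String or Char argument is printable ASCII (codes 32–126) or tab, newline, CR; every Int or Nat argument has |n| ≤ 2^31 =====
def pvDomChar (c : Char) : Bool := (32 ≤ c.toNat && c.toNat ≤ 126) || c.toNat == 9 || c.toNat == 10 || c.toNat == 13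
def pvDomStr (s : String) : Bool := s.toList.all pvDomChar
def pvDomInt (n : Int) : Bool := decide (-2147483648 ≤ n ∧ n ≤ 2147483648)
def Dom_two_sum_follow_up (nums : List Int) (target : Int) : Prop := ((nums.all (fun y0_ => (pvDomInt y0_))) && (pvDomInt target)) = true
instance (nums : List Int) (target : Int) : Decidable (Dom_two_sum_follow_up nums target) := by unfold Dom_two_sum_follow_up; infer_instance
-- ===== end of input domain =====

-- B replaces A's two-pointer sweep with a plain head-vs-rest pair count (simpler, not faster);
-- A sorts nums in place and B keeps that same mutation; the equivalence is about the return value.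

-- ===== PORT A =====
-- A's while loop; nums[left]/nums[right] are always in range in Python's loop, so getD is exact
def tspLoop (s : List Int) (t : Int) (count : Int) (left right : Nat) : Int :=
  if h : left < right then
    if s.getD left 0 + s.getD right 0 ≤ t then
      tspLoop s t count (left + 1) right
    else
      tspLoop s t (count + ((right : Int) - (left : Int))) left (right - 1)
  else count
termination_by right - left
decreasing_by all_goals omega

def two_sum_follow_up (nums : List Int) (target : Int) : Int :=
  if nums = [] then 0
  else tspLoop (PySem.List.sorted nums (fun x => x) false) target 0 0
        ((PySem.List.sorted nums (fun x => x) false).length - 1)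

-- ===== PORT B =====
-- B's while loop: peel the head x off rest, add the count of later y with x + y > target
def pairCountB : List Int → Int → Int
  | [], _ => 0
  | x :: rest, t => ((rest.countP (fun y => decide (x + y > t)) : Nat) : Int) + pairCountB rest t

def two_sum_follow_up_alt (nums : List Int) (target : Int) : Int :=
  pairCountB (PySem.List.sorted nums (fun x => x) false) target

-- ===== PRECONDITION & SPEC =====
def Spec_two_sum_follow_up (nums : List Int) (target : Int) (out : Int) : Prop := out = two_sum_follow_up_alt nums target
instance (nums : List Int) (target : Int) (out : Int) : Decidable (Spec_two_sum_follow_up nums target out) := by unfold Spec_two_sum_follow_up; infer_instance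

-- ===== CLAIM (what is proved, stated in full; the proofs are below) =====
def Claim_equal_two_sum_follow_up : Prop := ∀ (nums : List Int) (target : Int), Dom_two_sum_follow_up nums target → Spec_two_sum_follow_up nums target (two_sum_follow_up nums target)

-- ===== LEMMAS AND PROOFS =====

theorem getD_eq_get (l : List Int) (n : Nat) (h : n < l.length) : l.getD n 0 = l[n] := by
  simp [List.getD_eq_getElem?_getD, List.getElem?_eq_getElem h]

theorem pairCountB_short (l : List Int) (t : Int) (h : l.length ≤ 1) : pairCountB l t = 0 := by
  match l with
  | [] => rfl
  | [x] => simp [pairCountB]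
  | x :: y :: r => simp at h

theorem pairCountB_append_singleton (l : List Int) (z t : Int) :
    pairCountB (l ++ [z]) t
      = pairCountB l t + ((l.countP (fun x => decide (x + z > t)) : Nat) : Int) := by
  induction l with
  | nil => simp [pairCountB]
  | cons x xs ih =>
      simp [pairCountB, ih, List.countP_append, List.countP_cons]
      ring

-- loop invariant: on an index-monotone list, the two-pointer sweep from (left, right)
-- adds exactly the pair count of the window s[left..right]
theorem tspLoop_eq (s : List Int) (t : Int)
    (hmono : ∀ p q : Nat, p ≤ q → q < s.length → s.getD p 0 ≤ s.getD q 0) :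
    ∀ (n : Nat) (count : Int) (left right : Nat), right - left = n → right < s.length →
      tspLoop s t count left right
        = count + pairCountB ((s.drop left).take (right + 1 - left)) t := by
  intro n
  induction n with
  | zero =>
      intro count left right hn hlen
      rw [tspLoop, dif_neg (by omega : ¬ left < right)]
      rw [pairCountB_short _ t (by simp [List.length_take, List.length_drop]; omega)]
      ring
  | succ m ih =>
      intro count left right hn hlen
      have hlr : left < right := by omega
      have hls : left < s.length := by omega
      rw [tspLoop, dif_pos hlr]
      by_cases hc : s.getD left 0 + s.getD right 0 ≤ t
      · rw [if_pos hc, ih count (left + 1) right (by omega) hlen]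
        have hdrop : s.drop left = s.getD left 0 :: s.drop (left + 1) := by
          rw [getD_eq_get s left hls]; exact List.drop_eq_getElem_cons hls
        have hk : right + 1 - left = (right + 1 - (left + 1)) + 1 := by omega
        rw [hk, hdrop, List.take_succ_cons, pairCountB]
        have hzero : ((s.drop (left + 1)).take (right + 1 - (left + 1))).countP
            (fun y => decide (s.getD left 0 + y > t)) = 0 := by
          rw [List.countP_eq_zero]
          intro y hy
          rcases List.mem_iff_getElem.mp hy with ⟨i, hi, rfl⟩
          have hi2 : left + 1 + i ≤ right := by
            simp [List.length_take, List.length_drop] at hi; omega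
          rw [List.getElem_take, List.getElem_drop]
          have hy2 : s[left + 1 + i] ≤ s.getD right 0 := by
            rw [← getD_eq_get s _ (by omega)]
            exact hmono _ _ hi2 hlen
          simp only [decide_eq_true_eq]
          omega
        rw [hzero]
        simp
      · rw [if_neg hc, ih (count + ((right : Int) - (left : Int))) left (right - 1) (by omega) (by omega)]
        have hk1 : right - 1 + 1 - left = right - left := by omega
        have hk2 : right + 1 - left = (right - left) + 1 := by omega
        rw [hk1, hk2, List.take_add_one]
        have hget : (s.drop left)[right - left]? = some (s.getD right 0) := by
          rw [List.getElem?_eq_getElem (by simp [List.length_drop]; omega)]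
          rw [List.getElem_drop]
          have hidx : left + (right - left) = right := by omega
          simp only [hidx]
          rw [getD_eq_get s right (by omega)]
        rw [hget, Option.toList_some, pairCountB_append_singleton]
        have hfull : ((s.drop left).take (right - left)).countP
            (fun x => decide (x + s.getD right 0 > t))
            = ((s.drop left).take (right - left)).length := by
          rw [List.countP_eq_length]
          intro x hx
          rcases List.mem_iff_getElem.mp hx with ⟨i, hi, rfl⟩
          have hil : i < right - left := by
            simp [List.length_take, List.length_drop] at hi; omega
          rw [List.getElem_take, List.getElem_drop]
          have h1 : s.getD left 0 ≤ s[left + i] := by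
            rw [← getD_eq_get s _ (by omega)]
            exact hmono left (left + i) (by omega) (by omega)
          simp only [decide_eq_true_eq]
          omega
        rw [hfull]
        have hlt : ((s.drop left).take (right - left)).length = right - left := by
          simp [List.length_take, List.length_drop]; omega
        rw [hlt]
        have hcast : ((right - left : Nat) : Int) = (right : Int) - (left : Int) := by omega
        rw [hcast]
        ring

-- ===== VERDICT (by name: the statement is the Claim_ definition above) =====
theorem two_sum_follow_up_spec : Claim_equal_two_sum_follow_up := by
  intro nums target _
  unfold Spec_two_sum_follow_up two_sum_follow_up two_sum_follow_up_alt
  by_cases h : nums = []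
  · subst h
    rw [if_pos rfl, (PySem.List.sorted_eq_nil_iff [] _ false).mpr rfl]
    rfl
  · rw [if_neg h]
    have hlen := PySem.List.length_sorted nums (fun x => x) false
    have hpos : 0 < (PySem.List.sorted nums (fun x => x) false).length := by
      rw [hlen]
      cases nums with
      | nil => exact absurd rfl h
      | cons a l => simp
    have hmono : ∀ p q : Nat, p ≤ q →
        q < (PySem.List.sorted nums (fun x => x) false).length →
        (PySem.List.sorted nums (fun x => x) false).getD p 0
          ≤ (PySem.List.sorted nums (fun x => x) false).getD q 0 := by
      intro p q hpq hq
      rw [getD_eq_get _ _ (by omega), getD_eq_get _ _ hq]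
      exact PySem.List.sorted_id_getElem_mono nums hpq hq
    have hmain := tspLoop_eq (PySem.List.sorted nums (fun x => x) false) target hmono
      ((PySem.List.sorted nums (fun x => x) false).length - 1) 0 0
      ((PySem.List.sorted nums (fun x => x) false).length - 1) (by omega) (by omega)
    rw [hmain]
    rw [List.drop_zero]
    have hfix : (PySem.List.sorted nums (fun x => x) false).length - 1 + 1 - 0
        = (PySem.List.sorted nums (fun x => x) false).length := by omega
    rw [hfix, List.take_length]
    ring
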